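-- pv_equiv track=rewrite | github.com/SamuelScandrett99/Mut-SeqProject | epPCRsim_GUI/epPCRsim_GUI.py | invertingLogo
-- ===== SOURCE A (Python) =====
-- def invertingLogo(dictOfBaseCov, insert, nucleotides):
--
--     # calculating every possible base change
--     totalCov = {}
--     for loc, b in enumerate(insert):
--         totalCov[1+loc] = list()
--         for each in nucleotides:
--             if each != b:
--                 totalCov[1+loc].append(each)
--
--     # Dictionary of bases not changed to
--     uncovered = {}
--     for (a, b) in dictOfBaseCov.items():
--         for (x, y) in totalCov.items():
--             if a == x:
--                 difference = (list(set(y) - set(b)))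
--                 uncovered[a] = difference
--             elif x in uncovered:
--                 continue
--             elif a != x:
--                 uncovered[x] = y
--
--     #generate 4 strings of each of the missing bases
--     uncovlist = []
--     for atgc in nucleotides:
--         template = ""
--         for loc, letters in uncovered.items():
--             if atgc in letters:
--                 template += atgc
--             else:
--                 template += "'"
--         uncovlist.append(template)
--
--     return uncovlist
-- ===== SOURCE B (Python) =====
-- def invertingLogo(dictOfBaseCov, insert, nucleotides):
--     # One pass over the insert: per position, the nucleotides not equal to the
--     # base and not already covered; then one template string per nucleotide.
--     uncovered = [
--         [nt for nt in nucleotides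
--          if nt != base and nt not in dictOfBaseCov.get(pos, [])]
--         for pos, base in enumerate(insert, 1)
--     ]
--     return ["".join(nt if nt in letters else "'" for letters in uncovered)
--             for nt in nucleotides]
-- ===== Notes on version B (the rewrite author's own statement) =====
-- stated objective: simpler
-- what changed: B drops A's totalCov table and the nested dict-overlay loop (with its set differences and leftover-key bookkeeping) and computes, in one pass over enumerate(insert), the uncovered nucleotide list per position directly from dictOfBaseCov.get(pos, []), then joins the templates.
-- intended difference: On an empty coverage dict with a nonempty insert and at least one nonempty nucleotide string, A's overlay loop never runs so A returns a list of empty strings, while B returns the actual per-nucleotide templates (every base change uncovered), which is the intended value. — e.g. on invertingLogo([], "A", ["C"]): A returns [""], B returns ["C"]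
import Mathlib
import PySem

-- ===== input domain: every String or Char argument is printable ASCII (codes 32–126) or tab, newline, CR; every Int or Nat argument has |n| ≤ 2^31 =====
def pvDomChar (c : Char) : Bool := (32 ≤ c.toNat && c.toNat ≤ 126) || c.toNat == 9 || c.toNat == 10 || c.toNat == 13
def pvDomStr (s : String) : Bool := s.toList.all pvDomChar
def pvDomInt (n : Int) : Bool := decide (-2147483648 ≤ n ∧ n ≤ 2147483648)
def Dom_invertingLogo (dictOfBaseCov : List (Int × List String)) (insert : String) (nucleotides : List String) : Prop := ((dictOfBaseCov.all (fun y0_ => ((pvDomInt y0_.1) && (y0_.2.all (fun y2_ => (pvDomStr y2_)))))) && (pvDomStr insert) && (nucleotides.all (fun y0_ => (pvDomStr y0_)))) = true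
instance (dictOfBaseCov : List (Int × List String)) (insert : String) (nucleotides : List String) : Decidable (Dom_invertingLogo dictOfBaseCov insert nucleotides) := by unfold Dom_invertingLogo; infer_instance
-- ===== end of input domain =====

-- B replaces A's totalCov table and the nested dict-overlay loop by one pass over the
-- insert positions; B is the intended behaviour on an empty coverage dict (see D_ below).
-- ===== PORT A =====
def invertingLogo (dictOfBaseCov : List (Int × List String)) (insert : String) (nucleotides : List String) : List String :=
  let totalCov : PySem.Dict Int (List String) :=
    (PySem.List.enumerate insert.toList).foldl
      (fun tc lb =>
        let tc := tc.insert (1 + lb.1) []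
        nucleotides.foldl
          (fun tc each =>
            if each != String.ofList [lb.2] then
              tc.modify (1 + lb.1) [] (fun l => l ++ [each])   -- totalCov[1+loc].append(each)
            else tc)
          tc)
      PySem.Dict.empty
  let uncovered : PySem.Dict Int (List String) :=
    dictOfBaseCov.foldl
      (fun unc ab =>
        totalCov.items.foldl
          (fun unc xy =>
            if ab.1 == xy.1 then
              -- list(set(y) - set(b)); the Python set order is consumed only through membership below
              unc.insert ab.1 (PySem.Set.diff (PySem.Set.ofList xy.2) ab.2)
            else if unc.contains xy.1 then unc
            else unc.insert xy.1 xy.2)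
          unc)
      PySem.Dict.empty
  nucleotides.foldl
    (fun uncovlist atgc =>
      let template : List Char :=       -- template += … done over List Char, exact for string concatenation
        uncovered.items.foldl
          (fun t ll => if ll.2.contains atgc then t ++ atgc.toList else t ++ ['\''])
          []
      uncovlist ++ [String.ofList template])
    []

-- ===== PORT B =====
def invertingLogo_alt (dictOfBaseCov : List (Int × List String)) (insert : String) (nucleotides : List String) : List String :=
  let uncovered : List (List String) :=
    (PySem.List.enumerate insert.toList 1).map
      (fun pb =>
        nucleotides.filter
          (fun nt => nt != String.ofList [pb.2] && !((PySem.Dict.mk dictOfBaseCov).getD pb.1 []).contains nt))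
  nucleotides.map
    (fun nt =>
      String.ofList
        (uncovered.foldl (fun t letters => t ++ (if letters.contains nt then nt.toList else ['\''])) []))

-- ===== PRECONDITION & SPEC =====
-- Pre_ requires distinct keys: the List (Int × List String) encodes a Python dict, which
-- cannot hold duplicate keys, so this excludes no actual Python input.
def Pre_invertingLogo (dictOfBaseCov : List (Int × List String)) (insert : String) (nucleotides : List String) : Prop :=
  (dictOfBaseCov.map Prod.fst).Nodup
instance (dictOfBaseCov : List (Int × List String)) (insert : String) (nucleotides : List String) : Decidable (Pre_invertingLogo dictOfBaseCov insert nucleotides) := by unfold Pre_invertingLogo; infer_instance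
def pvWitness_invertingLogo : (List (Int × List String)) × String × List String :=
  ([(1, ["C"])], "AG", ["A", "C", "G", "T"])

-- On an empty coverage dict with a nonempty insert and some nonempty nucleotide, A's overlay
-- loop never runs so A returns a list of empty strings, while B returns the real per-nucleotide
-- templates (everything uncovered), which is the intended value.
def D_invertingLogo (dictOfBaseCov : List (Int × List String)) (insert : String) (nucleotides : List String) : Prop :=
  dictOfBaseCov = [] ∧ insert ≠ "" ∧ ∃ nt ∈ nucleotides, nt ≠ ""
instance (dictOfBaseCov : List (Int × List String)) (insert : String) (nucleotides : List String) : Decidable (D_invertingLogo dictOfBaseCov insert nucleotides) := by unfold D_invertingLogo; infer_instance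

def Spec_invertingLogo (dictOfBaseCov : List (Int × List String)) (insert : String) (nucleotides : List String) (out : List String) : Prop := ¬ D_invertingLogo dictOfBaseCov insert nucleotides → out = invertingLogo_alt dictOfBaseCov insert nucleotides
instance (dictOfBaseCov : List (Int × List String)) (insert : String) (nucleotides : List String) (out : List String) : Decidable (Spec_invertingLogo dictOfBaseCov insert nucleotides out) := by unfold Spec_invertingLogo; infer_instance

def pvDiffWitness_invertingLogo : (List (Int × List String)) × String × List String :=
  ([], "A", ["C"])
def pvDiffWitnessOut_invertingLogo : (List String) × (List String) := ([""], ["C"])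

-- ===== CLAIM (what is proved, stated in full; the proofs are below) =====
def Claim_unchanged_invertingLogo : Prop := ∀ (dictOfBaseCov : List (Int × List String)) (insert : String) (nucleotides : List String), Dom_invertingLogo dictOfBaseCov insert nucleotides → Pre_invertingLogo dictOfBaseCov insert nucleotides → Spec_invertingLogo dictOfBaseCov insert nucleotides (invertingLogo dictOfBaseCov insert nucleotides)
def Claim_changed_invertingLogo : Prop := Dom_invertingLogo (pvDiffWitness_invertingLogo.1) (pvDiffWitness_invertingLogo.2.1) (pvDiffWitness_invertingLogo.2.2) ∧ Pre_invertingLogo (pvDiffWitness_invertingLogo.1) (pvDiffWitness_invertingLogo.2.1) (pvDiffWitness_invertingLogo.2.2) ∧ D_invertingLogo (pvDiffWitness_invertingLogo.1) (pvDiffWitness_invertingLogo.2.1) (pvDiffWitness_invertingLogo.2.2) ∧ invertingLogo (pvDiffWitness_invertingLogo.1) (pvDiffWitness_invertingLogo.2.1) (pvDiffWitness_invertingLogo.2.2) = pvDiffWitnessOut_invertingLogo.1 ∧ invertingLogo_alt (pvDiffWitness_invertingLogo.1) (pvDiffWitness_invertingLogo.2.1) (pvDiffWitness_invertingLogo.2.2)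 = pvDiffWitnessOut_invertingLogo.2 ∧ pvDiffWitnessOut_invertingLogo.1 ≠ pvDiffWitnessOut_invertingLogo.2
def Claim_exact_invertingLogo : Prop := ∀ (dictOfBaseCov : List (Int × List String)) (insert : String) (nucleotides : List String), Dom_invertingLogo dictOfBaseCov insert nucleotides → Pre_invertingLogo dictOfBaseCov insert nucleotides → D_invertingLogo dictOfBaseCov insert nucleotides → invertingLogo dictOfBaseCov insert nucleotides ≠ invertingLogo_alt dictOfBaseCov insert nucleotides

-- ===== LEMMAS AND PROOFS =====

-- Abbreviations for A's intermediate structures (proof-only helpers).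
def pvDiff (y b : List String) : List String := PySem.Set.diff (PySem.Set.ofList y) b

def pvStep (a : Int) (b : List String) (unc : PySem.Dict Int (List String)) (xy : Int × List String) :
    PySem.Dict Int (List String) :=
  if a == xy.1 then unc.insert a (pvDiff xy.2 b)
  else if unc.contains xy.1 then unc
  else unc.insert xy.1 xy.2

def pvP (insert : String) (nucleotides : List String) : List (Int × List String) :=
  (PySem.List.enumerate insert.toList).map
    (fun lb => (1 + lb.1, nucleotides.filter (fun each => each != String.ofList [lb.2])))

def pvVal (d : List (Int × List String)) (xy : Int × List String) : List String :=
  match (PySem.Dict.mk d).get? xy.1 with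
  | some c => pvDiff xy.2 c
  | none => xy.2

-- distinct keys make the key function injective on the pair list
theorem pv_key_inj {P : List (Int × List String)} (h : (P.map Prod.fst).Nodup)
    {p q : Int × List String} (hp : p ∈ P) (hq : q ∈ P) (hk : p.1 = q.1) : p = q := by
  induction P with
  | nil => cases hp
  | cons r P ih =>
    simp only [List.map_cons, List.nodup_cons] at h
    rcases List.mem_cons.1 hp with rfl | hp' <;> rcases List.mem_cons.1 hq with rfl | hq'
    · rfl
    · exact absurd (hk ▸ List.mem_map_of_mem hq') h.1
    · exact absurd (hk ▸ List.mem_map_of_mem hp') h.1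
    · exact ih h.2 hp' hq'

-- the per-position append loop building totalCov[1+loc]
theorem pv_inner_build (nucleotides : List String) (c : Char) (k : Int)
    (tc : PySem.Dict Int (List String)) (v : List String) :
    nucleotides.foldl
      (fun tc each => if each != String.ofList [c] then tc.modify k [] (fun l => l ++ [each]) else tc)
      (tc.insert k v)
    = tc.insert k (v ++ nucleotides.filter (fun each => each != String.ofList [c])) := by
  induction nucleotides generalizing v with
  | nil => simp
  | cons a l ih =>
    rw [List.foldl_cons, List.filter_cons]
    have step : (tc.insert k v).modify k [] (fun l => l ++ [a]) = tc.insert k (v ++ [a]) := by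
      show (tc.insert k v).insert k (((tc.insert k v).getD k []) ++ [a]) = _
      rw [PySem.Dict.getD_insert_self, PySem.Dict.insert_insert_self]
    cases h : (a != String.ofList [c])
    · simp only [Bool.false_eq_true, if_false]
      exact ih v
    · simp only [if_true, step, ih (v ++ [a]), List.append_assoc, List.cons_append,
        List.nil_append]

theorem pv_nodup_keys_P (insert : String) (nucleotides : List String) :
    ((pvP insert nucleotides).map Prod.fst).Nodup := by
  unfold pvP
  rw [List.map_map]
  have h := PySem.List.pairwise_lt_enumerate insert.toList 0
  have h2 : (PySem.List.enumerate insert.toList 0).Pairwise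
      (fun p q : Int × Char => (Prod.fst ∘ fun lb : Int × Char =>
        (1 + lb.1, nucleotides.filter (fun each => each != String.ofList [lb.2]))) p ≠
        (Prod.fst ∘ fun lb : Int × Char =>
        (1 + lb.1, nucleotides.filter (fun each => each != String.ofList [lb.2]))) q) := by
    refine h.imp ?_
    intro p q hpq
    simp only [Function.comp]
    omega
  exact (List.pairwise_map).2 h2

theorem pv_totalCov (insert : String) (nucleotides : List String) :
    ((PySem.List.enumerate insert.toList).foldl
      (fun tc lb =>
        let tc := tc.insert (1 + lb.1) []
        nucleotides.foldl
          (fun tc each =>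
            if each != String.ofList [lb.2] then
              tc.modify (1 + lb.1) [] (fun l => l ++ [each])
            else tc)
          tc)
      PySem.Dict.empty).items = pvP insert nucleotides := by
  have hbody : ∀ (tc : PySem.Dict Int (List String)), ∀ lb ∈ PySem.List.enumerate insert.toList 0,
      (let tc' := tc.insert (1 + lb.1) [];
       nucleotides.foldl
        (fun tc each =>
          if each != String.ofList [lb.2] then tc.modify (1 + lb.1) [] (fun l => l ++ [each]) else tc)
        tc')
      = tc.insert (1 + lb.1) (nucleotides.filter (fun each => each != String.ofList [lb.2])) := by
    intro tc lb _
    have := pv_inner_build nucleotides lb.2 (1 + lb.1) tc []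
    simpa using this
  rw [PySem.List.foldl_congr_mem _ _ _ _ hbody]
  rw [PySem.Dict.items_foldl_insert_fresh (PySem.List.enumerate insert.toList 0)
    (fun lb => 1 + lb.1) (fun lb => nucleotides.filter (fun each => each != String.ofList [lb.2]))
    PySem.Dict.empty (by intro a _; rfl) ?_]
  · rfl
  · have h2 := pv_nodup_keys_P insert nucleotides
    unfold pvP at h2
    rwa [List.map_map] at h2

theorem pv_overlay (a : Int) (b : List String) (P : List (Int × List String))
    (hn : (P.map Prod.fst).Nodup) :
    ∀ (unc : PySem.Dict Int (List String)), (∀ xy ∈ P, unc.contains xy.1 = true) →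
    P.foldl (pvStep a b) unc
      = match P.find? (fun xy => a == xy.1) with
        | some xy => unc.insert a (pvDiff xy.2 b)
        | none => unc := by
  induction P with
  | nil => intro unc _; rfl
  | cons xy P ih =>
    intro unc hc
    simp only [List.map_cons, List.nodup_cons] at hn
    rw [List.foldl_cons, List.find?_cons]
    cases h : (a == xy.1)
    · have hstep : pvStep a b unc xy = unc := by
        unfold pvStep
        rw [h, hc xy (List.mem_cons_self)]
        simp
      rw [hstep, ih hn.2 unc (fun z hz => hc z (List.mem_cons_of_mem _ hz))]
    · have ha : a = xy.1 := by simpa using h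
      have hstep : pvStep a b unc xy = unc.insert a (pvDiff xy.2 b) := by
        unfold pvStep; rw [h]; simp
      rw [hstep]
      have hnone : P.find? (fun z => a == z.1) = none := by
        rw [List.find?_eq_none]
        intro z hz
        have hzm : z.1 ∈ P.map Prod.fst := List.mem_map_of_mem hz
        simp only [ha]
        intro hbeq
        exact hn.1 (by rw [eq_of_beq hbeq]; exact hzm)
      have := ih hn.2 (unc.insert a (pvDiff xy.2 b))
        (fun z hz => by
          rw [PySem.Dict.contains_insert]
          rw [hc z (List.mem_cons_of_mem _ hz), Bool.or_true])
      rw [this, hnone]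

theorem pv_first (a : Int) (b : List String) (P : List (Int × List String))
    (hn : (P.map Prod.fst).Nodup) :
    ∀ (unc : PySem.Dict Int (List String)), (∀ xy ∈ P, unc.contains xy.1 = false) →
    P.foldl (pvStep a b) unc
      = P.foldl (fun u xy => u.insert xy.1 (if a == xy.1 then pvDiff xy.2 b else xy.2)) unc := by
  induction P with
  | nil => intro unc _; rfl
  | cons xy P ih =>
    intro unc hc
    simp only [List.map_cons, List.nodup_cons] at hn
    rw [List.foldl_cons, List.foldl_cons]
    have hfresh : ∀ z ∈ P, (unc.insert xy.1 (if a == xy.1 then pvDiff xy.2 b else xy.2)).contains z.1 = false := by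
      intro z hz
      rw [PySem.Dict.contains_insert, hc z (List.mem_cons_of_mem _ hz), Bool.or_false]
      have hzm : z.1 ∈ P.map Prod.fst := List.mem_map_of_mem hz
      cases hb : (z.1 == xy.1)
      · rfl
      · exact absurd (show xy.1 ∈ List.map Prod.fst P by rw [← eq_of_beq hb]; exact hzm) hn.1
    cases h : (a == xy.1)
    · have hstep : pvStep a b unc xy = unc.insert xy.1 xy.2 := by
        unfold pvStep
        rw [h, hc xy (List.mem_cons_self)]
        simp
      rw [hstep]
      exact ih hn.2 _ (by simpa [h] using hfresh)
    · have hstep : pvStep a b unc xy = unc.insert xy.1 (pvDiff xy.2 b) := by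
        unfold pvStep; rw [h]
        simp [eq_of_beq h]
      rw [hstep]
      exact ih hn.2 _ (by simpa [h] using hfresh)

theorem pv_contains_of_items {P : List (Int × List String)} {unc : PySem.Dict Int (List String)}
    {v : Int × List String → List String}
    (hitems : unc.items = P.map (fun xy => (xy.1, v xy))) {xy : Int × List String} (hxy : xy ∈ P) :
    unc.contains xy.1 = true := by
  rw [PySem.Dict.contains_eq_decide_mem_keys]
  have : xy.1 ∈ unc.keys := by
    show xy.1 ∈ unc.items.map Prod.fst
    rw [hitems, List.map_map]
    exact List.mem_map_of_mem (f := Prod.fst ∘ fun xy => (xy.1, v xy)) hxy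
  simpa using this

theorem pv_outer (P : List (Int × List String)) (hPn : (P.map Prod.fst).Nodup) :
    ∀ (rest : List (Int × List String)), (rest.map Prod.fst).Nodup →
    ∀ (unc : PySem.Dict Int (List String)) (v : Int × List String → List String),
    unc.items = P.map (fun xy => (xy.1, v xy)) →
    (rest.foldl (fun unc ab => P.foldl (pvStep ab.1 ab.2) unc) unc).items
      = P.map (fun xy => (xy.1,
          match (PySem.Dict.mk rest).get? xy.1 with
          | some c => pvDiff xy.2 c
          | none => v xy)) := by
  intro rest
  induction rest with
  | nil =>
    intro _ unc v hitems
    rw [List.foldl_nil, hitems]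
    rfl
  | cons ab rest ih =>
    intro hrn unc v hitems
    simp only [List.map_cons, List.nodup_cons] at hrn
    rw [List.foldl_cons]
    rw [pv_overlay ab.1 ab.2 P hPn unc (fun z hz => pv_contains_of_items hitems hz)]
    cases hf : P.find? (fun xy => ab.1 == xy.1) with
    | none =>
      have hnf := List.find?_eq_none.1 hf
      rw [ih hrn.2 unc v hitems]
      refine List.map_congr_left ?_
      intro xy hxy
      have : ((PySem.Dict.mk (ab :: rest)).get? xy.1) = (PySem.Dict.mk rest).get? xy.1 := by
        rw [show (PySem.Dict.mk (ab :: rest)) = PySem.Dict.mk ((ab.1, ab.2) :: rest) by rfl]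
        rw [PySem.Dict.get?_mk_cons]
        have := hnf xy hxy
        simp only [Bool.not_eq_true] at this
        rw [this]
        simp
      rw [this]
    | some xy0 =>
      have hx0 : xy0 ∈ P := List.mem_of_find?_eq_some hf
      have hbeq : (ab.1 == xy0.1) = true := by
        have := List.find?_some hf
        simpa using this
      have hk0 : ab.1 = xy0.1 := eq_of_beq hbeq
      have hcont : unc.contains ab.1 = true := by
        rw [hk0]; exact pv_contains_of_items hitems hx0
      have hins : (unc.insert ab.1 (pvDiff xy0.2 ab.2)).items
          = P.map (fun xy => (xy.1, if xy.1 == ab.1 then pvDiff xy.2 ab.2 else v xy)) := by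
        rw [PySem.Dict.items_insert_of_contains unc _ hcont, hitems, List.map_map]
        refine List.map_congr_left ?_
        intro xy hxy
        simp only [Function.comp]
        cases hb : (xy.1 == ab.1)
        · simp
        · have hxx : xy = xy0 := pv_key_inj hPn hxy hx0 (by rw [eq_of_beq hb, hk0])
          rw [hxx, hk0]
          simp
    
      rw [ih hrn.2 _ _ hins]
      refine List.map_congr_left ?_
      intro xy hxy
      rw [show (PySem.Dict.mk (ab :: rest)) = PySem.Dict.mk ((ab.1, ab.2) :: rest) by rfl,
        PySem.Dict.get?_mk_cons]
      cases hb : (ab.1 == xy.1)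
      · have : ¬ (xy.1 == ab.1) = true := by
          intro hcon
          rw [eq_of_beq hcon] at hb
          simp at hb
        simp only [Bool.not_eq_true] at this
        rw [this]
        simp
      · have hrnone : (PySem.Dict.mk rest).get? xy.1 = none := by
          rw [PySem.Dict.get?_eq_none_iff_not_mem_keys]
          intro hmem
          rw [← eq_of_beq hb] at hmem
          exact hrn.1 (by simpa using hmem)
        rw [hrnone]
        have hxeq : (xy.1 == ab.1) = true := by rw [eq_of_beq hb]; simp
        rw [hxeq]
        simp

theorem pv_mem_val (d : List (Int × List String)) (xy : Int × List String) (s : String) :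
    s ∈ pvVal d xy ↔ s ∈ xy.2 ∧ ((PySem.Dict.mk d).getD xy.1 []).contains s = false := by
  unfold pvVal
  rw [PySem.Dict.getD_eq_get?_getD]
  cases h : (PySem.Dict.mk d).get? xy.1 with
  | none => simp
  | some c =>
    simp only [Option.getD_some]
    unfold pvDiff
    rw [show (PySem.Set.diff (PySem.Set.ofList xy.2) c) = (PySem.Set.ofList xy.2).diff c from rfl]
    rw [PySem.Set.mem_diff]
    rw [PySem.Set.mem_ofList]
    constructor
    · rintro ⟨h1, h2⟩
      refine ⟨h1, ?_⟩
      cases hb : c.contains s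
      · rfl
      · exact absurd (List.contains_iff_mem.1 hb) h2
    · rintro ⟨h1, h2⟩
      refine ⟨h1, fun hmem => ?_⟩
      rw [List.contains_iff_mem.2 hmem] at h2
      cases h2

theorem pv_foldl_append_map {α β : Type} (f : α → β) :
    ∀ (l : List α) (acc : List β), l.foldl (fun a x => a ++ [f x]) acc = acc ++ l.map f := by
  intro l
  induction l with
  | nil => intro acc; simp
  | cons x l ih => intro acc; simp [ih]

theorem pv_enum_shift {α : Type} :
    ∀ (xs : List α) (s : Int), PySem.List.enumerate xs (s + 1)
      = (PySem.List.enumerate xs s).map (fun lb => (1 + lb.1, lb.2)) := by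
  intro xs
  induction xs with
  | nil => intro s; simp [PySem.List.enumerate_nil]
  | cons x xs ih =>
    intro s
    rw [PySem.List.enumerate_cons, PySem.List.enumerate_cons, List.map_cons, ih (s + 1)]
    simp [Int.add_comm]

theorem pv_foldl_nil_adds {α : Type} (g : α → List Char) :
    ∀ (l : List α) (t : List Char), (∀ x ∈ l, g x = []) → l.foldl (fun t x => t ++ g x) t = t := by
  intro l
  induction l with
  | nil => intro t _; rfl
  | cons x l ih =>
    intro t h
    rw [List.foldl_cons, h x (List.mem_cons_self), List.append_nil]
    exact ih t (fun z hz => h z (List.mem_cons_of_mem _ hz))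

theorem pv_foldl_len_mono {α : Type} (g : α → List Char) :
    ∀ (l : List α) (t : List Char), t.length ≤ (l.foldl (fun t x => t ++ g x) t).length := by
  intro l
  induction l with
  | nil => intro t; simp
  | cons x l ih =>
    intro t
    rw [List.foldl_cons]
    calc t.length ≤ (t ++ g x).length := by simp
    _ ≤ _ := ih (t ++ g x)

-- A, with its totalCov fold named and the overlay body seen as pvStep (definitional)
theorem pv_A_shape (d : List (Int × List String)) (insert : String) (nucleotides : List String) :
    invertingLogo d insert nucleotides
      = nucleotides.foldl
          (fun uncovlist atgc =>
            uncovlist ++ [String.ofList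
              ((d.foldl
                  (fun unc ab =>
                    (((PySem.List.enumerate insert.toList).foldl
                        (fun tc lb =>
                          let tc := tc.insert (1 + lb.1) []
                          nucleotides.foldl
                            (fun tc each =>
                              if each != String.ofList [lb.2] then
                                tc.modify (1 + lb.1) [] (fun l => l ++ [each])
                              else tc)
                            tc)
                        PySem.Dict.empty).items).foldl (pvStep ab.1 ab.2) unc)
                  PySem.Dict.empty).items.foldl
                (fun t ll => if ll.2.contains atgc then t ++ atgc.toList else t ++ ['\''])
                [])])
          [] := rfl

theorem pv_uncovered_items (ab : Int × List String) (rest : List (Int × List String))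
    (insert : String) (nucleotides : List String)
    (hn : (((ab :: rest) : List (Int × List String)).map Prod.fst).Nodup) :
    ((ab :: rest).foldl
        (fun unc ab' => (pvP insert nucleotides).foldl (pvStep ab'.1 ab'.2) unc)
        PySem.Dict.empty).items
      = (pvP insert nucleotides).map (fun xy => (xy.1, pvVal (ab :: rest) xy)) := by
  have hPn := pv_nodup_keys_P insert nucleotides
  simp only [List.map_cons, List.nodup_cons] at hn
  rw [List.foldl_cons]
  rw [pv_first ab.1 ab.2 _ hPn PySem.Dict.empty (fun z _ => rfl)]
  have hitems : ((pvP insert nucleotides).foldl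
      (fun u xy => u.insert xy.1 (if ab.1 == xy.1 then pvDiff xy.2 ab.2 else xy.2))
      PySem.Dict.empty).items
      = (pvP insert nucleotides).map
          (fun xy => (xy.1, if ab.1 == xy.1 then pvDiff xy.2 ab.2 else xy.2)) := by
    have := PySem.Dict.items_foldl_insert_fresh (pvP insert nucleotides)
      (fun xy => xy.1) (fun xy => if ab.1 == xy.1 then pvDiff xy.2 ab.2 else xy.2)
      PySem.Dict.empty (fun z _ => rfl) (by
        have h2 := hPn
        unfold pvP at h2
        rwa [List.map_map] at h2)
    simpa using this
  rw [pv_outer _ hPn rest hn.2 _ _ hitems]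
  refine List.map_congr_left ?_
  intro xy hxy
  unfold pvVal
  rw [show (PySem.Dict.mk (ab :: rest)) = PySem.Dict.mk ((ab.1, ab.2) :: rest) from rfl,
    PySem.Dict.get?_mk_cons]
  cases hb : (ab.1 == xy.1)
  · simp only [Bool.false_eq_true, if_false]
  · have hnone : (PySem.Dict.mk rest).get? xy.1 = none := by
      rw [PySem.Dict.get?_eq_none_iff_not_mem_keys]
      intro hmem
      rw [← eq_of_beq hb] at hmem
      exact hn.1 (by simpa using hmem)
    rw [hnone]
    simp

theorem pv_A_cons (ab : Int × List String) (rest : List (Int × List String))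
    (insert : String) (nucleotides : List String)
    (hn : (((ab :: rest) : List (Int × List String)).map Prod.fst).Nodup) :
    invertingLogo (ab :: rest) insert nucleotides
      = nucleotides.map (fun atgc => String.ofList
          ((pvP insert nucleotides).foldl
            (fun t xy => if (pvVal (ab :: rest) xy).contains atgc then t ++ atgc.toList
              else t ++ ['\''])
            [])) := by
  rw [pv_A_shape, pv_foldl_append_map]
  rw [pv_totalCov insert nucleotides]
  rw [pv_uncovered_items ab rest insert nucleotides hn]
  rw [List.nil_append]
  refine List.map_congr_left ?_
  intro atgc _
  rw [List.foldl_map]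

theorem pv_B_shape (d : List (Int × List String)) (insert : String) (nucleotides : List String) :
    invertingLogo_alt d insert nucleotides
      = nucleotides.map (fun nt => String.ofList
          ((PySem.List.enumerate insert.toList).foldl
            (fun t lb =>
              t ++ (if (nucleotides.filter
                  (fun s => s != String.ofList [lb.2]
                    && !((PySem.Dict.mk d).getD (1 + lb.1) []).contains s)).contains nt
                then nt.toList else ['\'']))
            [])) := by
  unfold invertingLogo_alt
  have h1 : (PySem.List.enumerate insert.toList 1)
      = (PySem.List.enumerate insert.toList 0).map (fun lb => (1 + lb.1, lb.2)) := by
    have := pv_enum_shift insert.toList 0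
    simpa using this
  rw [h1]
  refine List.map_congr_left ?_
  intro nt _
  rw [List.map_map, List.foldl_map]
  rfl

theorem pv_main_cons (ab : Int × List String) (rest : List (Int × List String))
    (insert : String) (nucleotides : List String)
    (hn : (((ab :: rest) : List (Int × List String)).map Prod.fst).Nodup) :
    invertingLogo (ab :: rest) insert nucleotides
      = invertingLogo_alt (ab :: rest) insert nucleotides := by
  rw [pv_A_cons ab rest insert nucleotides hn, pv_B_shape]
  refine List.map_congr_left ?_
  intro atgc hm
  congr 1
  unfold pvP
  rw [List.foldl_map]
  refine PySem.List.foldl_congr_mem _ _ _ _ ?_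
  intro t lb _
  have hcond :
      ((pvVal (ab :: rest)
          (1 + lb.1, nucleotides.filter (fun each => each != String.ofList [lb.2]))).contains atgc)
      = ((nucleotides.filter
          (fun s => s != String.ofList [lb.2]
            && !((PySem.Dict.mk (ab :: rest)).getD (1 + lb.1) []).contains s)).contains atgc) := by
    rw [← Bool.coe_iff_coe]
    rw [List.contains_iff_mem, List.contains_iff_mem, pv_mem_val, List.mem_filter, List.mem_filter]
    constructor
    · rintro ⟨⟨h1, h2⟩, h3⟩
      refine ⟨h1, ?_⟩
      rw [Bool.and_eq_true]
      refine ⟨h2, ?_⟩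
      rw [show ((1 + lb.1, nucleotides.filter (fun each => each != String.ofList [lb.2])).1) = 1 + lb.1 from rfl] at h3
      rw [h3]
      rfl
    · rintro ⟨h1, h2⟩
      rw [Bool.and_eq_true] at h2
      refine ⟨⟨h1, h2.1⟩, ?_⟩
      have := h2.2
      rw [Bool.not_eq_true'] at this
      exact this
  rw [hcond]
  cases ((nucleotides.filter
      (fun s => s != String.ofList [lb.2]
        && !((PySem.Dict.mk (ab :: rest)).getD (1 + lb.1) []).contains s)).contains atgc)
  · rfl
  · rfl

theorem pv_A_nil (insert : String) (nucleotides : List String) :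
    invertingLogo [] insert nucleotides = nucleotides.map (fun _ => "") := by
  rw [pv_A_shape]
  rw [show (nucleotides.foldl
      (fun uncovlist atgc => uncovlist ++ [String.ofList
        ((([] : List (Int × List String)).foldl
            (fun unc ab =>
              ((((PySem.List.enumerate insert.toList).foldl
                  (fun tc lb =>
                    let tc := tc.insert (1 + lb.1) []
                    nucleotides.foldl
                      (fun tc each =>
                        if each != String.ofList [lb.2] then
                          tc.modify (1 + lb.1) [] (fun l => l ++ [each])
                        else tc)
                      tc)
                  PySem.Dict.empty).items).foldl (pvStep ab.1 ab.2) unc))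
            PySem.Dict.empty).items.foldl
          (fun t ll => if ll.2.contains atgc then t ++ atgc.toList else t ++ ['\''])
          [])])
      [])
    = nucleotides.foldl (fun uncovlist _ => uncovlist ++ [String.ofList []]) [] from rfl]
  rw [pv_foldl_append_map (fun _ => String.ofList ([] : List Char)) nucleotides []]
  rfl

theorem pv_B_empty_insert (d : List (Int × List String)) (nucleotides : List String) :
    invertingLogo_alt d "" nucleotides = nucleotides.map (fun _ => "") := by
  rw [pv_B_shape]
  rfl

theorem pv_B_all_empty (insert : String) (nucleotides : List String)
    (hall : ∀ nt ∈ nucleotides, nt = "") :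
    invertingLogo_alt [] insert nucleotides = nucleotides.map (fun _ => "") := by
  rw [pv_B_shape]
  refine List.map_congr_left ?_
  intro nt hm
  rw [hall nt hm]
  have hz : (PySem.List.enumerate insert.toList).foldl
      (fun t lb => t ++ (if (nucleotides.filter
          (fun s => s != String.ofList [lb.2]
            && !((PySem.Dict.mk ([] : List (Int × List String))).getD (1 + lb.1) []).contains s)).contains ""
        then ("" : String).toList else ['\''])) ([] : List Char) = [] := by
    refine pv_foldl_nil_adds _ _ _ ?_
    intro lb _
    have hmem : ("" : String) ∈ nucleotides.filter
        (fun s => s != String.ofList [lb.2]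
          && !((PySem.Dict.mk ([] : List (Int × List String))).getD (1 + lb.1) []).contains s) := by
      rw [List.mem_filter]
      refine ⟨(hall nt hm) ▸ hm, ?_⟩
      rw [show ((PySem.Dict.mk ([] : List (Int × List String))).getD (1 + lb.1) []) = [] from rfl]
      simp
    rw [List.contains_iff_mem.2 hmem]
    rfl
  rw [hz]

-- ===== VERDICT (by name: the statement is the Claim_ definition above) =====
theorem invertingLogo_spec : Claim_unchanged_invertingLogo := by
  intro d ins nuc hdom hpre hnD
  cases d with
  | cons ab rest => exact pv_main_cons ab rest ins nuc hpre
  | nil =>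
    unfold D_invertingLogo at hnD
    by_cases hins : ins = ""
    · subst hins
      rw [pv_A_nil, pv_B_empty_insert]
    · have hall : ∀ nt ∈ nuc, nt = "" := by
        intro nt hm
        by_contra hne
        exact hnD ⟨rfl, hins, nt, hm, hne⟩
      rw [pv_A_nil, pv_B_all_empty ins nuc hall]

theorem invertingLogo_changed : Claim_changed_invertingLogo := by
  unfold Claim_changed_invertingLogo; decide

theorem invertingLogo_tight : Claim_exact_invertingLogo := by
  intro d ins nuc hdom hpre hD
  unfold D_invertingLogo at hD
  obtain ⟨hd, hins, nt0, hm0, hne0⟩ := hD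
  subst hd
  intro heq
  rw [pv_A_nil, pv_B_shape] at heq
  have hval := List.map_inj_left.1 heq nt0 hm0
  obtain ⟨c, cs, hto⟩ : ∃ c cs, ins.toList = c :: cs := by
    cases hcl : ins.toList with
    | nil => exact absurd (by simpa using hcl) hins
    | cons c cs => exact ⟨c, cs, rfl⟩
  rw [hto, PySem.List.enumerate_cons, List.foldl_cons] at hval
  have hL : ([] : List Char)
      = (PySem.List.enumerate cs (0 + 1)).foldl
          (fun t lb =>
            t ++ (if (nuc.filter
                (fun s => s != String.ofList [lb.2]
                  && !((PySem.Dict.mk ([] : List (Int × List String))).getD (1 + lb.1) []).contains s)).contains nt0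
              then nt0.toList else ['\'']))
          ([] ++ (if (nuc.filter
                (fun s => s != String.ofList [(((0 : Int), c)).2]
                  && !((PySem.Dict.mk ([] : List (Int × List String))).getD (1 + (((0 : Int), c)).1) []).contains s)).contains nt0
              then nt0.toList else ['\''])) := by
    have := congrArg String.toList hval
    simpa using this
  have hlen := pv_foldl_len_mono
    (fun lb : Int × Char =>
      (if (nuc.filter
          (fun s => s != String.ofList [lb.2]
            && !((PySem.Dict.mk ([] : List (Int × List String))).getD (1 + lb.1) []).contains s)).contains nt0
        then nt0.toList else ['\'']))
    (PySem.List.enumerate cs (0 + 1))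
    ([] ++ (if (nuc.filter
          (fun s => s != String.ofList [(((0 : Int), c)).2]
            && !((PySem.Dict.mk ([] : List (Int × List String))).getD (1 + (((0 : Int), c)).1) []).contains s)).contains nt0
        then nt0.toList else ['\'']))
  rw [← hL] at hlen
  rw [List.nil_append] at hlen
  simp only [List.length_nil] at hlen
  have hpos : 0 < (if (nuc.filter
        (fun s => s != String.ofList [(((0 : Int), c)).2]
          && !((PySem.Dict.mk ([] : List (Int × List String))).getD (1 + (((0 : Int), c)).1) []).contains s)).contains nt0
      then nt0.toList else ['\'']).length := by
    split
    · have : nt0.toList ≠ [] := by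
        intro hcon
        exact hne0 (by simpa using hcon)
      exact List.length_pos_of_ne_nil this
    · simp
  exact Nat.lt_irrefl _ (Nat.lt_of_lt_of_le hpos hlen)
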